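-- pv_equiv track=rewrite | github.com/guohao/advent-of-code | 2024/day22/part2.py | f
-- ===== SOURCE A (Python) =====
-- def f(s: int):
--     seq = [s]
--     for _ in range(2000):
--         s = (s * 64) ^ s
--         s %= 16777216
--         s = (s // 32) ^ s
--         s %= 16777216
--         s = (s * 2048) ^ s
--         s %= 16777216
--         seq.append(s)
--     return seq
-- ===== SOURCE B (Python) =====
-- MASK = 16777215
--
--
-- def _step(s):
--     s = ((s << 6) ^ s) & MASK
--     s = (s >> 5) ^ s
--     s = ((s << 11) ^ s) & MASK
--     return s
--
--
-- def f(s: int):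
--     # The step map is linear over GF(2) on 24-bit states, so it splits into two
--     # precomputed 4096-entry tables: step(t) = hi[t >> 12] ^ lo[t & 4095].
--     lo = [_step(i) for i in range(4096)]
--     hi = [_step(j << 12) for j in range(4096)]
--     t = s % 16777216
--     seq = [s]
--     for _ in range(2000):
--         t = hi[t >> 12] ^ lo[t & 4095]
--         seq.append(t)
--     return seq
-- ===== Notes on version B (the rewrite author's own statement) =====
-- stated objective: alternative
-- what changed: Exploits that the xorshift step is GF(2)-linear on 24-bit states: B precomputes two 4096-entry tables for the low and high 12 bits and advances the state by two table lookups and one XOR per iteration, instead of A's three shift/xor/mod passes per iteration.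
import Mathlib
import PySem

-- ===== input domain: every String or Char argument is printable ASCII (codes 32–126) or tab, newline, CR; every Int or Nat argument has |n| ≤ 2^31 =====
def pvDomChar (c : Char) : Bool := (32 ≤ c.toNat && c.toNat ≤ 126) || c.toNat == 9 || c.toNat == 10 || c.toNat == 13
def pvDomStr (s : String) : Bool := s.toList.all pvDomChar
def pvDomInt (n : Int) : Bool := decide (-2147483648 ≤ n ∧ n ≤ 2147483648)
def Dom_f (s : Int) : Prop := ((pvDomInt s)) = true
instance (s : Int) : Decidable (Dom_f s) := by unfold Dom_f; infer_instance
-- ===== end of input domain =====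

-- B exploits that A's xorshift step is GF(2)-linear on 24-bit states: it precomputes two
-- 4096-entry tables for the low/high 12 bits and advances the state by two table lookups
-- and one XOR per iteration, instead of A's per-iteration shift/xor/mod arithmetic.

-- ===== PORT A =====
def f (s : Int) : List Int :=
  ((List.range 2000).foldl
    (fun (st : Int × List Int) _ =>
      let s1 := PySem.Int.mod (PySem.Int.bxor (st.1 * 64) st.1) 16777216
      let s2 := PySem.Int.mod (PySem.Int.bxor (PySem.Int.floordiv s1 32) s1) 16777216
      let s3 := PySem.Int.mod (PySem.Int.bxor (s2 * 2048) s2) 16777216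
      (s3, st.2 ++ [s3]))
    (s, [s])).2

-- ===== PORT B =====
-- Source B's _step helper (pure shift/xor/mask arithmetic)
def bStep (s : Int) : Int :=
  let a := PySem.Int.band (PySem.Int.bxor (s <<< (6:Nat)) s) 16777215
  let b := PySem.Int.bxor (a >>> (5:Nat)) a
  PySem.Int.band (PySem.Int.bxor (b <<< (11:Nat)) b) 16777215

def f_alt (s : Int) : List Int :=
  let lo := (List.range 4096).map (fun (i : Nat) => bStep (i : Int))
  let hi := (List.range 4096).map (fun (j : Nat) => bStep ((j : Int) <<< (12:Nat)))
  ((List.range 2000).foldl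
    (fun (st : Int × List Int) _ =>
      let t := PySem.Int.bxor (PySem.List.pyGetD hi (st.1 >>> (12:Nat)) 0)
                              (PySem.List.pyGetD lo (PySem.Int.band st.1 4095) 0)
      (t, st.2 ++ [t]))
    (PySem.Int.mod s 16777216, [s])).2

-- ===== PRECONDITION & SPEC =====
def Spec_f (s : Int) (out : List Int) : Prop := out = f_alt s
instance (s : Int) (out : List Int) : Decidable (Spec_f s out) := by unfold Spec_f; infer_instance

-- ===== CLAIM (what is proved, stated in full; the proofs are below) =====
def Claim_equal_f : Prop := ∀ (s : Int), Dom_f s → Spec_f s (f s)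

-- ===== LEMMAS AND PROOFS =====

-- The step function on 24-bit Nat states, staged
def h1N (t : Nat) : Nat := ((t <<< 6) ^^^ t) &&& 16777215
def h2N (a : Nat) : Nat := (a >>> 5) ^^^ a
def h3N (b : Nat) : Nat := ((b <<< 11) ^^^ b) &&& 16777215
def gN (t : Nat) : Nat := h3N (h2N (h1N t))

theorem mask_eq_mod (x : Nat) : x &&& 16777215 = x % 16777216 := by
  have := Nat.and_two_pow_sub_one_eq_mod x 24
  norm_num at this
  exact this

theorem h1N_lt (t : Nat) : h1N t < 16777216 := by
  have : h1N t ≤ 16777215 := Nat.and_le_right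
  omega

theorem gN_lt (t : Nat) : gN t < 16777216 := by
  have : gN t ≤ 16777215 := Nat.and_le_right
  omega

-- adding numbers with disjoint bits is xor
theorem add_eq_xor_of_and_eq_zero (a b : Nat) (h : a &&& b = 0) : a + b = a ^^^ b := by
  induction a using Nat.binaryRec generalizing b with
  | zero => simp
  | bit ba a ih =>
    induction b using Nat.bitCasesOn with
    | bit bb b' =>
      rw [Nat.land_bit] at h
      rw [Nat.xor_bit]
      obtain ⟨h1, h2⟩ := Nat.bit_eq_zero_iff.mp h
      have hih := ih b' h1
      cases ba <;> cases bb <;> simp [Nat.bit_val] at h2 ⊢ <;> omega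

-- stage linearity over GF(2)
theorem shiftLeft_xor (x y k : Nat) : (x ^^^ y) <<< k = (x <<< k) ^^^ (y <<< k) := by
  apply Nat.eq_of_testBit_eq
  intro i
  simp only [Nat.testBit_xor, Nat.testBit_shiftLeft]
  cases Decidable.em (k ≤ i) with
  | inl h => simp [h]
  | inr h => simp [h]

theorem shiftRight_xor (x y k : Nat) : (x ^^^ y) >>> k = (x >>> k) ^^^ (y >>> k) := by
  apply Nat.eq_of_testBit_eq
  intro i
  simp [Nat.testBit_xor, Nat.testBit_shiftRight]

theorem h1N_xor (x y : Nat) : h1N (x ^^^ y) = h1N x ^^^ h1N y := by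
  unfold h1N
  rw [shiftLeft_xor, ← Nat.and_xor_distrib_right]
  congr 1
  apply Nat.eq_of_testBit_eq
  intro i
  simp only [Nat.testBit_xor]
  cases x.testBit i <;> cases y.testBit i <;>
    cases (x <<< 6).testBit i <;> cases (y <<< 6).testBit i <;> rfl

theorem h2N_xor (x y : Nat) : h2N (x ^^^ y) = h2N x ^^^ h2N y := by
  unfold h2N
  rw [shiftRight_xor]
  apply Nat.eq_of_testBit_eq
  intro i
  simp only [Nat.testBit_xor]
  cases x.testBit i <;> cases y.testBit i <;>
    cases (x >>> 5).testBit i <;> cases (y >>> 5).testBit i <;> rfl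

theorem h3N_xor (x y : Nat) : h3N (x ^^^ y) = h3N x ^^^ h3N y := by
  unfold h3N
  rw [shiftLeft_xor, ← Nat.and_xor_distrib_right]
  congr 1
  apply Nat.eq_of_testBit_eq
  intro i
  simp only [Nat.testBit_xor]
  cases x.testBit i <;> cases y.testBit i <;>
    cases (x <<< 11).testBit i <;> cases (y <<< 11).testBit i <;> rfl

theorem gN_xor (x y : Nat) : gN (x ^^^ y) = gN x ^^^ gN y := by
  unfold gN
  rw [h1N_xor, h2N_xor, h3N_xor]

-- 12/12 bit split of a state
theorem split12 (t : Nat) : ((t >>> 12) <<< 12) ^^^ (t &&& 4095) = t := by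
  apply Nat.eq_of_testBit_eq
  intro i
  rw [show (4095 : Nat) = 2 ^ 12 - 1 by norm_num]
  simp only [Nat.testBit_xor, Nat.testBit_shiftLeft, Nat.testBit_shiftRight, Nat.testBit_and,
    Nat.testBit_two_pow_sub_one]
  by_cases hi : 12 ≤ i
  · have e : 12 + (i - 12) = i := by omega
    simp [hi, e, show ¬ i < 12 by omega]
  · simp [hi, show i < 12 by omega]

-- Source B's _step over a Nat cast computes gN
theorem bStep_natCast (n : Nat) : bStep ((n : Nat) : Int) = ((gN n : Nat) : Int) := by
  unfold bStep
  simp only []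
  rw [show ((n : Int) <<< (6:Nat)) = ((n <<< 6 : Nat) : Int) from rfl,
    PySem.Int.bxor_natCast,
    show ((16777215 : Int)) = ((16777215 : Nat) : Int) from rfl,
    PySem.Int.band_natCast,
    show ((((((n <<< 6) ^^^ n) &&& 16777215 : Nat)) : Int) >>> (5:Nat))
      = (((((n <<< 6) ^^^ n) &&& 16777215) >>> 5 : Nat) : Int) from rfl,
    PySem.Int.bxor_natCast,
    show (((((((n <<< 6) ^^^ n) &&& 16777215) >>> 5) ^^^ (((n <<< 6) ^^^ n) &&& 16777215) : Nat) : Int) <<< (11:Nat))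
      = ((((((n <<< 6) ^^^ n) &&& 16777215) >>> 5) ^^^ (((n <<< 6) ^^^ n) &&& 16777215)) <<< 11 : Nat) from rfl,
    PySem.Int.bxor_natCast, PySem.Int.band_natCast]
  rfl

-- first sub-step of A, for arbitrary (possibly negative) Int state
theorem s1_eq (s : Int) :
    PySem.Int.mod (PySem.Int.bxor (s * 64) s) 16777216
      = ((h1N ((s % 16777216).toNat) : Nat) : Int) := by
  unfold h1N
  by_cases hs : 0 ≤ s
  · obtain ⟨n, rfl⟩ := Int.eq_ofNat_of_zero_le hs
    have hm : ((((n : Nat) : Int)) % 16777216).toNat = n % 16777216 := by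
      have hc : ((n : Nat) : Int) % 16777216 = ((n % 16777216 : Nat) : Int) := by
        push_cast
        rfl
      rw [hc]
      omega
    rw [hm]
    have c64 : ((n : Nat) : Int) * 64 = ((n * 64 : Nat) : Int) := by push_cast; ring
    rw [c64, PySem.Int.bxor_natCast]
    have e : PySem.Int.mod (((n * 64) ^^^ n : Nat) : Int) 16777216
        = ((((n * 64) ^^^ n) % 16777216 : Nat) : Int) := by
      exact_mod_cast PySem.Int.mod_natCast ((n * 64) ^^^ n) 16777216
    rw [e]
    congr 1
    -- Nat level: low 24 bits of (n*64 ^ n) depend only on the low 24 bits of n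
    rw [mask_eq_mod, show n * 64 = n <<< 6 by simp [Nat.shiftLeft_eq]]
    apply Nat.eq_of_testBit_eq
    intro i
    rw [show (16777216 : Nat) = 2 ^ 24 by norm_num]
    simp only [Nat.testBit_mod_two_pow, Nat.testBit_xor, Nat.testBit_shiftLeft]
    by_cases hi : i < 24
    · by_cases h6 : 6 ≤ i
      · simp [hi, h6, show i - 6 < 24 by omega]
      · simp [hi, h6]
    · simp [hi]
  · -- s < 0 : two's-complement case
    set n : Nat := (-s - 1).toNat with hn
    have hs' : s = -(n : Int) - 1 := by omega
    have hbx : PySem.Int.bxor (s * 64) s = (((64 * n + 63) ^^^ n : Nat) : Int) := by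
      unfold PySem.Int.bxor
      have h1 : ¬ (0 : Int) ≤ s * 64 := by omega
      rw [if_neg h1, if_neg hs]
      have ea : (-(s * 64) - 1).toNat = 64 * n + 63 := by omega
      have eb : (-s - 1).toNat = n := by omega
      rw [ea, eb]
    rw [hbx]
    have e : PySem.Int.mod (((64 * n + 63) ^^^ n : Nat) : Int) 16777216
        = ((((64 * n + 63) ^^^ n) % 16777216 : Nat) : Int) := by
      exact_mod_cast PySem.Int.mod_natCast ((64 * n + 63) ^^^ n) 16777216
    rw [e]
    congr 1
    have hxm : (16777215 : Nat) - n % 16777216 = 16777215 ^^^ (n % 16777216) := by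
      have hd : (16777215 ^^^ (n % 16777216)) &&& (n % 16777216) = 0 := by
        rw [Nat.and_xor_distrib_right, Nat.and_self]
        have : (16777215 : Nat) &&& (n % 16777216) = n % 16777216 := by
          rw [Nat.and_comm, mask_eq_mod]
          omega
        rw [this, Nat.xor_self]
      have hadd : (16777215 ^^^ (n % 16777216)) + (n % 16777216) = 16777215 := by
        rw [add_eq_xor_of_and_eq_zero _ _ hd, Nat.xor_xor_cancel_right]
      omega
    have hm : (s % 16777216).toNat = 16777215 ^^^ (n % 16777216) := by
      rw [← hxm]
      omega
    rw [hm, mask_eq_mod]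
    -- Nat level bit computation (the state's low bits are the complements of n's)
    apply Nat.eq_of_testBit_eq
    intro i
    rw [show (16777216 : Nat) = 2 ^ 24 by norm_num, show (16777215 : Nat) = 2 ^ 24 - 1 by norm_num,
      show 64 * n + 63 = 2 ^ 6 * n + 63 by norm_num]
    simp only [Nat.testBit_mod_two_pow, Nat.testBit_xor, Nat.testBit_shiftLeft,
      Nat.testBit_two_pow_sub_one,
      Nat.testBit_two_pow_mul_add n (by norm_num : (63 : Nat) < 2 ^ 6)]
    by_cases hi : i < 24
    · by_cases h6 : 6 ≤ i
      · have e1 : ¬ i < 6 := by omega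
        have e2 : i - 6 < 24 := by omega
        simp only [hi, h6, e1, e2, decide_true, Bool.true_and, if_false]
        cases n.testBit (i - 6) <;> cases n.testBit i <;> simp
      · have e1 : i < 6 := by omega
        have h63b : (63 : Nat).testBit i = true := by
          rw [show (63 : Nat) = 2 ^ 6 - 1 by norm_num, Nat.testBit_two_pow_sub_one]
          simp [e1]
        simp [hi, h6, e1, h63b]
    · simp [hi]

-- second and third sub-steps of A, on in-range Nat states
theorem s2_eq (u : Nat) (hu : u < 16777216) :
    PySem.Int.mod (PySem.Int.bxor (PySem.Int.floordiv ((u : Nat) : Int) 32) ((u : Nat) : Int)) 16777216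
      = ((h2N u : Nat) : Int) := by
  have c : PySem.Int.floordiv ((u : Nat) : Int) 32 = ((u / 32 : Nat) : Int) := by
    exact_mod_cast PySem.Int.floordiv_natCast u 32
  rw [c, PySem.Int.bxor_natCast]
  have e : PySem.Int.mod (((u / 32) ^^^ u : Nat) : Int) 16777216
      = ((((u / 32) ^^^ u) % 16777216 : Nat) : Int) := by
    exact_mod_cast PySem.Int.mod_natCast ((u / 32) ^^^ u) 16777216
  rw [e]
  congr 1
  unfold h2N
  rw [show u >>> 5 = u / 32 by simp [Nat.shiftRight_eq_div_pow]]
  have hx : (u / 32) ^^^ u < 16777216 := by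
    rw [show (16777216 : Nat) = 2 ^ 24 by norm_num] at hu ⊢
    exact Nat.xor_lt_two_pow (by omega) hu
  exact Nat.mod_eq_of_lt hx

theorem s3_eq (v : Nat) :
    PySem.Int.mod (PySem.Int.bxor (((v : Nat) : Int) * 2048) ((v : Nat) : Int)) 16777216
      = ((h3N v : Nat) : Int) := by
  have c : ((v : Nat) : Int) * 2048 = ((v * 2048 : Nat) : Int) := by push_cast; ring
  rw [c, PySem.Int.bxor_natCast]
  have e : PySem.Int.mod (((v * 2048) ^^^ v : Nat) : Int) 16777216
      = ((((v * 2048) ^^^ v) % 16777216 : Nat) : Int) := by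
    exact_mod_cast PySem.Int.mod_natCast ((v * 2048) ^^^ v) 16777216
  rw [e]
  congr 1
  unfold h3N
  rw [show v * 2048 = v <<< 11 by simp [Nat.shiftLeft_eq], mask_eq_mod]

-- A's whole loop step computes gN of the low 24 bits of the state
theorem stepA_eq (s : Int) :
    PySem.Int.mod
      (PySem.Int.bxor
        ((PySem.Int.mod
            (PySem.Int.bxor
              (PySem.Int.floordiv (PySem.Int.mod (PySem.Int.bxor (s * 64) s) 16777216) 32)
              (PySem.Int.mod (PySem.Int.bxor (s * 64) s) 16777216))
            16777216) * 2048)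
        (PySem.Int.mod
          (PySem.Int.bxor
            (PySem.Int.floordiv (PySem.Int.mod (PySem.Int.bxor (s * 64) s) 16777216) 32)
            (PySem.Int.mod (PySem.Int.bxor (s * 64) s) 16777216))
          16777216))
      16777216
      = ((gN ((s % 16777216).toNat) : Nat) : Int) := by
  rw [s1_eq s, s2_eq _ (h1N_lt _), s3_eq]
  rfl

-- B's table-lookup step computes gN on in-range states
theorem stepB_eq (m : Nat) (hm : m < 16777216) :
    PySem.Int.bxor
      (PySem.List.pyGetD ((List.range 4096).map (fun (j : Nat) => bStep ((j : Int) <<< (12:Nat)))) (((m : Nat) : Int) >>> (12:Nat)) 0)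
      (PySem.List.pyGetD ((List.range 4096).map (fun (i : Nat) => bStep (i : Int))) (PySem.Int.band ((m : Nat) : Int) 4095) 0)
      = ((gN m : Nat) : Int) := by
  rw [show (((m : Nat) : Int) >>> (12:Nat)) = ((m >>> 12 : Nat) : Int) from rfl,
    show ((4095 : Int)) = ((4095 : Nat) : Int) from rfl, PySem.Int.band_natCast,
    PySem.List.pyGetD_natCast, PySem.List.pyGetD_natCast]
  have hhi : m >>> 12 < 4096 := by
    rw [Nat.shiftRight_eq_div_pow]
    omega
  have hlo : m &&& 4095 < 4096 := by
    have : m &&& 4095 ≤ 4095 := Nat.and_le_right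
    omega
  rw [PySem.List.getD_map_range _ _ _ _ hhi, PySem.List.getD_map_range _ _ _ _ hlo,
    show (((m >>> 12 : Nat) : Int) <<< (12:Nat)) = (((m >>> 12) <<< 12 : Nat) : Int) from rfl,
    bStep_natCast, bStep_natCast, PySem.Int.bxor_natCast, ← gN_xor, split12]

-- the two loops agree, given the low-24-bits invariant
theorem fold_eq (l : List Nat) (sA t : Int) (acc : List Int)
    (ht : t = PySem.Int.mod sA 16777216) :
    (l.foldl
      (fun (st : Int × List Int) _ =>
        let s1 := PySem.Int.mod (PySem.Int.bxor (st.1 * 64) st.1) 16777216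
        let s2 := PySem.Int.mod (PySem.Int.bxor (PySem.Int.floordiv s1 32) s1) 16777216
        let s3 := PySem.Int.mod (PySem.Int.bxor (s2 * 2048) s2) 16777216
        (s3, st.2 ++ [s3]))
      (sA, acc)).2
    = (l.foldl
      (fun (st : Int × List Int) _ =>
        let t := PySem.Int.bxor
          (PySem.List.pyGetD ((List.range 4096).map (fun (j : Nat) => bStep ((j : Int) <<< (12:Nat)))) (st.1 >>> (12:Nat)) 0)
          (PySem.List.pyGetD ((List.range 4096).map (fun (i : Nat) => bStep (i : Int))) (PySem.Int.band st.1 4095) 0)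
        (t, st.2 ++ [t]))
      (t, acc)).2 := by
  induction l generalizing sA t acc with
  | nil => simp
  | cons x xs ih =>
    have h0 : (0 : Int) < 16777216 := by norm_num
    have hnn : 0 ≤ t := ht ▸ PySem.Int.mod_nonneg sA h0
    have hlt : t < 16777216 := ht ▸ PySem.Int.mod_lt sA h0
    have hmcast : ((t.toNat : Nat) : Int) = t := by omega
    have hmlt : t.toNat < 16777216 := by omega
    have hemod : (sA % 16777216).toNat = t.toNat := by
      have : t = sA % 16777216 := by
        rw [ht, PySem.Int.mod_eq_emod_of_pos h0]
      omega
    simp only [List.foldl_cons]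
    rw [stepA_eq sA, hemod, ← hmcast, stepB_eq t.toNat hmlt]
    apply ih
    simp only [Int.toNat_natCast]
    have e : PySem.Int.mod ((gN t.toNat : Nat) : Int) 16777216
        = (((gN t.toNat) % 16777216 : Nat) : Int) := by
      exact_mod_cast PySem.Int.mod_natCast (gN t.toNat) 16777216
    rw [e, Nat.mod_eq_of_lt (gN_lt _)]

-- ===== VERDICT (by name: the statement is the Claim_ definition above) =====
theorem f_spec : Claim_equal_f := by
  intro s _
  unfold Spec_f f f_alt
  exact fold_eq (List.range 2000) s (PySem.Int.mod s 16777216) [s] rfl
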